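-- pv_equiv track=rewrite | github.com/Elfiend/HackerRank | Algorithms/GoFreightHiringTest/AnagramDifference.py | getAnagramDiff
-- ===== SOURCE A (Python) =====
-- def getAnagramDiff(firstWord, secondWord):
--
--     firstAnagrams = ''.join(sorted(firstWord))
--     secondAnagrams = ''.join(sorted(secondWord))
--     if firstAnagrams == secondAnagrams:
--         return 0
--
--     diff = 0
--     firstWordDict = {}
--     secondWordDict = {}
--     for ch in firstAnagrams:
--         if ch in firstWordDict:
--             firstWordDict[ch] += 1
--         else:
--             firstWordDict[ch] = 1
--     for ch in secondAnagrams: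
--         if ch in secondWordDict:
--             secondWordDict[ch] += 1
--         else:
--             secondWordDict[ch] = 1
--
--     for ch in firstWordDict.keys():
--         if not(ch in secondWordDict):
--             diff += firstWordDict[ch]
--         elif firstWordDict[ch] > secondWordDict[ch]:
--             diff += firstWordDict[ch] - secondWordDict[ch]
--
--     return diff
-- ===== SOURCE B (Python) =====
-- def getAnagramDiff(firstWord, secondWord):
--     first = sorted(firstWord)
--     second = sorted(secondWord)
--     i = j = 0
--     diff = 0
--     while i < len(first) and j < len(second):
--         if first[i] == second[j]:
--             i += 1
--             j += 1
--         elif first[i] < second[j]: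
--             diff += 1
--             i += 1
--         else:
--             j += 1
--     return diff + (len(first) - i)
-- ===== Notes on version B (the rewrite author's own statement) =====
-- stated objective: alternative
-- what changed: B replaces A's two frequency dictionaries and key-scan with a two-pointer merge over the two sorted character lists, counting the first word's unmatched characters directly.
import Mathlib
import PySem

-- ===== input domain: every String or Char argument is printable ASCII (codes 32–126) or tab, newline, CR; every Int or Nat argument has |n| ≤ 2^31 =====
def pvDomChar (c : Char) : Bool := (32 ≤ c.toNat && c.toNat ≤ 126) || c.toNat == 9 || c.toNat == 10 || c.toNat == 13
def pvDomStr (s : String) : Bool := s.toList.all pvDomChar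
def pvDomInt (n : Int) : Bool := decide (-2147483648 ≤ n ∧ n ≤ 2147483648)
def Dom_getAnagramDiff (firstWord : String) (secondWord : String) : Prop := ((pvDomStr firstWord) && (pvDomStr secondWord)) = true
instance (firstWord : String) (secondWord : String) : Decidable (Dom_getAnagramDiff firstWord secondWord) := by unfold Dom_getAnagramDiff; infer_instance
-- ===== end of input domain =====

-- B replaces A's two frequency dictionaries and key-scan with a two-pointer merge over the
-- two sorted character lists (objective: alternative, a genuinely different algorithm of the same cost).

-- ===== PORT A =====
-- ''.join(sorted(w)) is kept as the sorted List Char (comparison and iteration of a Python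
-- string coincide with comparison and iteration of its character list).
-- the counting loop: 'if ch in d: d[ch] += 1 else: d[ch] = 1' (d[ch] with ch present is getD ch 0, exact here)
def pvCount (xs : List Char) : PySem.Dict Char Int :=
  xs.foldl (fun d ch => if d.contains ch then d.insert ch (d.getD ch 0 + 1) else d.insert ch 1)
    PySem.Dict.empty

def getAnagramDiff (firstWord : String) (secondWord : String) : Int :=
  let firstAnagrams := PySem.List.sorted firstWord.toList (fun c => c)
  let secondAnagrams := PySem.List.sorted secondWord.toList (fun c => c)
  if firstAnagrams = secondAnagrams then 0
  else
    let firstWordDict := pvCount firstAnagrams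
    let secondWordDict := pvCount secondAnagrams
    -- 'for ch in firstWordDict.keys(): …' (d[ch] with ch a key is getD ch 0, exact here)
    firstWordDict.keys.foldl
      (fun diff ch =>
        if !(secondWordDict.contains ch) then diff + firstWordDict.getD ch 0
        else if firstWordDict.getD ch 0 > secondWordDict.getD ch 0 then
          diff + (firstWordDict.getD ch 0 - secondWordDict.getD ch 0)
        else diff)
      0

-- ===== PORT B =====
-- the while loop over indices i, j plus the final 'diff + (len(first) - i)', as structural
-- recursion on the two suffixes (the base case 'suffix of first, []' returns its length = len(first)-i)
def pvMergeDiff : List Char → List Char → Int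
  | [], _ => 0
  | f, [] => (f.length : Int)
  | x :: xs, y :: ys =>
    if x = y then pvMergeDiff xs ys
    else if x < y then 1 + pvMergeDiff xs (y :: ys)
    else pvMergeDiff (x :: xs) ys

def getAnagramDiff_alt (firstWord : String) (secondWord : String) : Int :=
  pvMergeDiff (PySem.List.sorted firstWord.toList (fun c => c))
    (PySem.List.sorted secondWord.toList (fun c => c))

-- ===== PRECONDITION & SPEC =====
def Spec_getAnagramDiff (firstWord : String) (secondWord : String) (out : Int) : Prop := out = getAnagramDiff_alt firstWord secondWord
instance (firstWord : String) (secondWord : String) (out : Int) : Decidable (Spec_getAnagramDiff firstWord secondWord out) := by unfold Spec_getAnagramDiff; infer_instance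

-- ===== CLAIM (what is proved, stated in full; the proofs are below) =====
def Claim_equal_getAnagramDiff : Prop := ∀ (firstWord : String) (secondWord : String), Dom_getAnagramDiff firstWord secondWord → Spec_getAnagramDiff firstWord secondWord (getAnagramDiff firstWord secondWord)

-- ===== LEMMAS AND PROOFS =====

theorem pv_cons_sub (x : Char) (m n : Multiset Char) (h : n.count x = 0) :
    (x ::ₘ m) - n = x ::ₘ (m - n) := by
  ext c
  by_cases hc : c = x
  · subst hc
    simp [Multiset.count_sub, h]
  · simp [Multiset.count_sub, Multiset.count_cons_of_ne hc]

-- the two-pointer merge on sorted lists computes the size of the multiset difference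
theorem pvMergeDiff_card (f s : List Char) :
    f.Pairwise (· ≤ ·) → s.Pairwise (· ≤ ·) →
    pvMergeDiff f s = (((f : Multiset Char) - (s : Multiset Char)).card : Int) := by
  fun_induction pvMergeDiff f s with
  | case1 s => intro _ _; simp
  | case2 f h => intro _ _; simp
  | case3 xs y ys ih =>
    intro hf hs
    rw [ih hf.tail hs.tail]
    have : ((y :: xs : List Char) : Multiset Char) - ((y :: ys : List Char) : Multiset Char)
        = ((xs : Multiset Char) - (ys : Multiset Char)) := by
      rw [← Multiset.cons_coe, ← Multiset.cons_coe, Multiset.sub_cons, Multiset.erase_cons_head]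
    rw [this]
  | case4 x xs y ys hne hlt ih =>
    intro hf hs
    rw [ih hf.tail hs]
    have hx : Multiset.count x (y ::ₘ (ys : Multiset Char)) = 0 := by
      rw [Multiset.count_eq_zero]
      intro hmem
      rcases (by simpa using hmem : x = y ∨ x ∈ ys) with h | h
      · exact hne h
      · exact absurd (lt_of_lt_of_le hlt (List.rel_of_pairwise_cons hs h)) (lt_irrefl x)
    rw [show ((x :: xs : List Char) : Multiset Char) = x ::ₘ (xs : Multiset Char) from rfl,
      show ((y :: ys : List Char) : Multiset Char) = y ::ₘ (ys : Multiset Char) from rfl,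
      pv_cons_sub x _ _ hx]
    simp
    ring
  | case5 x xs y ys hne hnlt ih =>
    intro hf hs
    rw [ih hf hs.tail]
    have hyx : y < x := lt_of_le_of_ne (not_lt.mp hnlt) (fun h => hne h.symm)
    have hy : y ∉ (x :: xs) := by
      intro hmem
      rcases (by simpa using hmem : y = x ∨ y ∈ xs) with h | h
      · exact absurd (h ▸ hyx) (lt_irrefl x)
      · exact absurd (lt_of_lt_of_le hyx (List.rel_of_pairwise_cons hf h)) (lt_irrefl y)
    have : ((x :: xs : List Char) : Multiset Char) - ((y :: ys : List Char) : Multiset Char)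
        = ((x :: xs : List Char) : Multiset Char) - ((ys : List Char) : Multiset Char) := by
      rw [show ((y :: ys : List Char) : Multiset Char) = y ::ₘ (ys : Multiset Char) from rfl,
        Multiset.sub_cons, Multiset.erase_of_notMem (by simpa using hy)]
    rw [this]

theorem pvCount_eq_counter (xs : List Char) : pvCount xs = PySem.Dict.counter xs := by
  unfold pvCount
  rw [← PySem.Dict.foldl_insert_getD_add_one_eq_counter]
  have : (fun (d : PySem.Dict Char Int) ch =>
      if d.contains ch then d.insert ch (d.getD ch 0 + 1) else d.insert ch 1)
      = (fun (d : PySem.Dict Char Int) ch => d.insert ch (d.getD ch 0 + 1)) := by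
    funext d ch
    by_cases h : d.contains ch = true
    · simp [h]
    · rw [if_neg (by simp [h]), PySem.Dict.getD_of_not_contains d 0 (by simpa using h)]
      norm_num
  rw [this]

-- each key's contribution in A's final loop is the truncated count difference
theorem pv_term_eq (f s : List Char) (ch : Char) :
    (if !(PySem.Dict.counter s).contains ch then ((PySem.Dict.counter f).getD ch 0 : Int)
     else if (PySem.Dict.counter f).getD ch 0 > (PySem.Dict.counter s).getD ch 0 then
       (PySem.Dict.counter f).getD ch 0 - (PySem.Dict.counter s).getD ch 0
     else 0)
    = ((f.count ch - s.count ch : ℕ) : Int) := by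
  rw [PySem.Dict.getD_counter, PySem.Dict.getD_counter, PySem.Dict.contains_counter]
  by_cases hmem : ch ∈ s
  · rw [if_neg (by simpa using hmem)]
    by_cases hgt : (s.count ch : Int) < (f.count ch : Int)
    · rw [if_pos hgt]; omega
    · rw [if_neg hgt]; omega
  · have : s.count ch = 0 := List.count_eq_zero.mpr hmem
    rw [if_pos (by simpa using hmem), this]
    omega

-- the sum of truncated count differences over the distinct characters of f is the
-- size of the multiset difference
theorem pv_sum_eq_card (f s : List Char) :
    ((PySem.Set.ofList f).map (fun ch => f.count ch - s.count ch)).sum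
      = ((f : Multiset Char) - (s : Multiset Char)).card := by
  rw [← List.sum_toFinset _ (PySem.Set.nodup_ofList f)]
  have hfin : (PySem.Set.ofList f).toFinset = f.toFinset := by
    ext c; simp [PySem.Set.mem_ofList]
  rw [hfin, ← Multiset.toFinset_sum_count_eq (((f : Multiset Char) - (s : Multiset Char)))]
  have hsub : (((f : Multiset Char) - (s : Multiset Char))).toFinset ⊆ f.toFinset := by
    intro a ha
    rw [Multiset.mem_toFinset] at ha
    rw [List.mem_toFinset]
    have := Multiset.count_pos.mpr ha
    rw [Multiset.count_sub] at this
    have : 0 < Multiset.count a (f : Multiset Char) := by omega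
    simpa using Multiset.count_pos.mp this
  rw [Finset.sum_subset hsub (by
    intro a _ ha
    rw [Multiset.mem_toFinset] at ha
    exact Multiset.count_eq_zero.mpr ha)]
  apply Finset.sum_congr rfl
  intro a _
  rw [Multiset.count_sub]
  simp

-- ===== VERDICT (by name: the statement is the Claim_ definition above) =====
theorem getAnagramDiff_spec : Claim_equal_getAnagramDiff := by
  intro firstWord secondWord _
  unfold Spec_getAnagramDiff getAnagramDiff getAnagramDiff_alt
  have hf := PySem.List.sorted_pairwise firstWord.toList (fun c => c)
  have hs := PySem.List.sorted_pairwise secondWord.toList (fun c => c)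
  set f := PySem.List.sorted firstWord.toList (fun c => c) with hfdef
  set s := PySem.List.sorted secondWord.toList (fun c => c) with hsdef
  rw [pvMergeDiff_card f s hf hs]
  by_cases heq : f = s
  · rw [if_pos heq, heq]
    simp
  · rw [if_neg heq]
    simp only [pvCount_eq_counter, PySem.Dict.keys_counter]
    have hbody : (fun (diff : Int) ch =>
        if !(PySem.Dict.counter s).contains ch then diff + (PySem.Dict.counter f).getD ch 0
        else if (PySem.Dict.counter f).getD ch 0 > (PySem.Dict.counter s).getD ch 0 then
          diff + ((PySem.Dict.counter f).getD ch 0 - (PySem.Dict.counter s).getD ch 0)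
        else diff)
        = (fun (diff : Int) ch => diff + ((f.count ch - s.count ch : ℕ) : Int)) := by
      funext diff ch
      rw [← pv_term_eq f s ch]
      split_ifs <;> ring
    rw [hbody, PySem.List.foldl_add]
    have hmap : (List.map (fun ch => ((f.count ch - s.count ch : ℕ) : Int)) (PySem.Set.ofList f)).sum
        = ((((PySem.Set.ofList f).map (fun ch => f.count ch - s.count ch)).sum : ℕ) : Int) := by
      rw [Nat.cast_list_sum, List.map_map]
      rfl
    rw [hmap, pv_sum_eq_card f s]
    ring
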